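-- pv_equiv track=rewrite | github.com/gagewrye/Projects | AirBnB.py | num_listings
-- ===== SOURCE A (Python) =====
-- def num_listings(d):
--     """
--     This function takes a dictionary that is in the format of the one
--     returned by host_listings (Function 2). It returns a list l where l[i] is the
--     number of hosts that have exactly i listings.
--
--     :param d: dictionary from host_listings
--     :return l: list containing hows manys hosts have the index number of listings
--     """
--     l = [0, 0, 0, 0, 0, 0, 0, 0, 0, 0, 0]
--     slots = 10
--     for key in d:
--         number = len(d[key])
--         if number > slots:
--             for i in range((number - slots)):
--                 l.append(0)
--             slots = number
--         l[number] = l[number] + 1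
--     return l
-- ===== SOURCE B (Python) =====
-- def num_listings(d):
--     lens = sorted(len(v) for v in d.values())
--     top = lens[-1] if lens and lens[-1] > 10 else 10
--     out = []
--     rest = lens
--     for i in range(top + 1):
--         c = 0
--         while rest and rest[0] == i:
--             c += 1
--             rest = rest[1:]
--         out.append(c)
--     return out
-- ===== Notes on version B (the rewrite author's own statement) =====
-- stated objective: alternative
-- what changed: A tallies in one pass into a growable histogram list; B sorts the listing lengths and then emits the histogram by a merge-style scan that consumes runs of equal values while walking the output indices (length from the sorted list's last element, min 11).
import Mathlib
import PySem

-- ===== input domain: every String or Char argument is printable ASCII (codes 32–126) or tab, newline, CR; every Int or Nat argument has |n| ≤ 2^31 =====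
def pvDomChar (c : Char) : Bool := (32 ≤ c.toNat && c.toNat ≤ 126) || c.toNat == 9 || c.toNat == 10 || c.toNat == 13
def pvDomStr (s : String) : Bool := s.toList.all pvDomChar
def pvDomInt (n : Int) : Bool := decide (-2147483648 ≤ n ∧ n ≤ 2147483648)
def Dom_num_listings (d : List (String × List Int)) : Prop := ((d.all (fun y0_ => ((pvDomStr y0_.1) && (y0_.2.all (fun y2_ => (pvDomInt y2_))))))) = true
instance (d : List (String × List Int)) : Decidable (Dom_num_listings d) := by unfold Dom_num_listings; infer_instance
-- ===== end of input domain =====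

-- B replaces A's grow-and-increment histogram loop by sort-then-scan: sort the listing
-- lengths, then emit each histogram slot by consuming the run of equal values with a
-- pointer (objective: alternative algorithm); the return values are proved equal.

-- ===== PORT A =====
-- the dict argument, modelled as in Python: insertion order, overwrite in place
def pvDictOf (d : List (String × List Int)) : PySem.Dict String (List Int) :=
  d.foldl (fun acc kv => acc.insert kv.1 kv.2) PySem.Dict.empty

-- A's loop body on the state (l, slots); 'for key in d' with 'number = len(d[key])' reads
-- each key's own value, i.e. walks the items of the dict in order
def numListingsStep (st : List Int × Int) (kv : String × List Int) : List Int × Int :=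
  let number : Int := (kv.2.length : Int)
  let l := st.1
  let slots := st.2
  let (l, slots) :=
    if number > slots then
      ((PySem.List.pyRange 0 (number - slots) 1).foldl (fun acc _ => acc ++ [(0 : Int)]) l, number)
    else (l, slots)
  (PySem.List.pySetD l number (PySem.List.pyGetD l number 0 + 1), slots)
  -- l[number] is always in range here (invariant len(l) == slots + 1 ≥ number + 1), so the
  -- total forms pySetD/pyGetD are exact

def num_listings (d : List (String × List Int)) : List Int :=
  ((pvDictOf d).items.foldl numListingsStep
    (([0, 0, 0, 0, 0, 0, 0, 0, 0, 0, 0] : List Int), (10 : Int))).1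

-- ===== PORT B =====
-- B's inner 'while rest and rest[0] == i: c += 1; rest = rest[1:]' loop, structural on rest
def bRun (i : Int) (c : Int) : List Int → Int × List Int
  | [] => (c, [])
  | x :: xs => if x == i then bRun i (c + 1) xs else (c, x :: xs)

def num_listings_alt (d : List (String × List Int)) : List Int :=
  let lens : List Int :=
    PySem.List.sorted ((pvDictOf d).values.map (fun v => (v.length : Int))) (fun x => x) false
  -- 'lens[-1] if lens and lens[-1] > 10 else 10' (lens[-1] read via pyGetD: only used nonempty)
  let top : Int :=
    if !lens.isEmpty && PySem.List.pyGetD lens (-1) 0 > 10 then PySem.List.pyGetD lens (-1) 0 else 10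
  ((PySem.List.pyRange 0 (top + 1) 1).foldl
      (fun st i => let cr := bRun i 0 st.2; (st.1 ++ [cr.1], cr.2))
      (([] : List Int), lens)).1

-- ===== PRECONDITION & SPEC =====
def Spec_num_listings (d : List (String × List Int)) (out : List Int) : Prop := out = num_listings_alt d
instance (d : List (String × List Int)) (out : List Int) : Decidable (Spec_num_listings d out) := by unfold Spec_num_listings; infer_instance

-- ===== CLAIM (what is proved, stated in full; the proofs are below) =====
def Claim_equal_num_listings : Prop := ∀ (d : List (String × List Int)), Dom_num_listings d → Spec_num_listings d (num_listings d)

-- ===== LEMMAS AND PROOFS =====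

theorem pv_getD_set (l : List Int) (n j : Nat) (a : Int) (h : n < l.length) :
    (l.set n a).getD j 0 = if j = n then a else l.getD j 0 := by
  simp only [List.getD_eq_getElem?_getD, List.getElem?_set]
  split
  · next he => subst he; simp
  · next he => rw [if_neg (fun hje => he hje.symm)]

theorem pv_getD_append_rep (l : List Int) (k j : Nat) :
    (l ++ List.replicate k (0:Int)).getD j 0 = l.getD j 0 := by
  simp only [List.getD_eq_getElem?_getD, List.getElem?_append]
  split
  · rfl
  · next h =>
    rcases Nat.lt_or_ge (j - l.length) k with hk | hk
    · simp [hk, List.getElem?_eq_none (le_of_not_gt h)]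
    · simp [List.getElem?_eq_none (le_of_not_gt h), hk]

-- A's loop invariant: len(l) == slots + 1; slots is the running max of the lengths
-- (seeded with 10), and slot j of the result accumulates the count of lengths equal to j
theorem num_listings_core : ∀ (vs : List (String × List Int)) (l : List Int) (slots : Int),
    (l.length : Int) = slots + 1 →
    ((((vs.foldl numListingsStep (l, slots)).1.length : Int) = (vs.foldl numListingsStep (l, slots)).2 + 1) ∧
     ((vs.foldl numListingsStep (l, slots)).2
        = vs.foldl (fun m v => if (v.2.length : Int) > m then (v.2.length : Int) else m) slots) ∧
     (∀ j : Nat, (vs.foldl numListingsStep (l, slots)).1.getD j 0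
        = l.getD j 0 + ((vs.map (fun v => (v.2.length : Int))).count (j : Int) : Int))) := by
  intro vs
  induction vs with
  | nil => intro l slots h; refine ⟨h, rfl, fun j => by simp⟩
  | cons v rest ih =>
    intro l slots h
    simp only [List.foldl_cons]
    by_cases hgt : (v.2.length : Int) > slots
    · -- extend
      have hstep : numListingsStep (l, slots) v =
          (( (l ++ List.replicate ((v.2.length : Int) - slots).toNat 0).set v.2.length
              ((l ++ List.replicate ((v.2.length : Int) - slots).toNat 0).getD v.2.length 0 + 1),
            (v.2.length : Int))) := by
        simp only [numListingsStep, if_pos hgt]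
        rw [PySem.List.foldl_append_singleton_eq_map]
        have hrange : ((PySem.List.pyRange 0 ((v.2.length : Int) - slots) 1).map
            (fun _ => (0:Int))) = List.replicate ((v.2.length : Int) - slots).toNat 0 := by
          rw [PySem.List.pyRange_one, List.map_map]
          simp [Function.comp_def, List.map_const']
        rw [hrange]
        simp [PySem.List.pySetD_natCast, PySem.List.pyGetD_natCast]
      rw [hstep]
      set l' : List Int := (l ++ List.replicate ((v.2.length : Int) - slots).toNat 0) with hl'
      have hlen' : (l'.length : Int) = (v.2.length : Int) + 1 := by
        simp [hl']; omega
      have hnlt : v.2.length < l'.length := by omega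
      have hinv : (((l'.set v.2.length (l'.getD v.2.length 0 + 1)).length : Int)) = (v.2.length : Int) + 1 := by
        simpa using hlen'
      obtain ⟨c1, c2, c3⟩ := ih _ _ hinv
      refine ⟨c1, ?_, ?_⟩
      · rw [c2]; simp [hgt]
      · intro j
        rw [c3 j, pv_getD_set _ _ _ _ hnlt]
        by_cases hj : j = v.2.length
        · subst hj
          rw [if_pos rfl, pv_getD_append_rep, List.map_cons, List.count_cons]
          simp; ring
        · rw [if_neg hj, pv_getD_append_rep, List.map_cons, List.count_cons]
          have hne : ((v.2.length : Int) == (j : Int)) = false := by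
            simp; omega
          simp [hne]
    · -- no extend
      have hstep : numListingsStep (l, slots) v =
          ((l.set v.2.length (l.getD v.2.length 0 + 1)), slots) := by
        simp only [numListingsStep, if_neg hgt]
        simp [PySem.List.pySetD_natCast, PySem.List.pyGetD_natCast]
      rw [hstep]
      have hnlt : v.2.length < l.length := by omega
      have hinv : (((l.set v.2.length (l.getD v.2.length 0 + 1)).length : Int)) = slots + 1 := by
        simpa using h
      obtain ⟨c1, c2, c3⟩ := ih _ _ hinv
      refine ⟨c1, ?_, ?_⟩
      · rw [c2]; simp [hgt]
      · intro j
        rw [c3 j, pv_getD_set _ _ _ _ hnlt]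
        by_cases hj : j = v.2.length
        · subst hj
          rw [if_pos rfl, List.map_cons, List.count_cons]
          simp; ring
        · rw [if_neg hj, List.map_cons, List.count_cons]
          have hne : ((v.2.length : Int) == (j : Int)) = false := by
            simp; omega
          simp [hne]

-- B's while loop on a sorted suffix whose elements are all ≥ i: it counts the occurrences
-- of i and leaves the suffix of elements > i
theorem bRun_spec (i : Int) : ∀ (rest : List Int) (c : Int),
    rest.Pairwise (· ≤ ·) → (∀ x ∈ rest, i ≤ x) →
    bRun i c rest = (c + (rest.count i : Int), rest.dropWhile (· == i)) := by
  intro rest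
  induction rest with
  | nil => intro c _ _; simp [bRun]
  | cons x xs ih =>
    intro c hsort hge
    by_cases hx : x = i
    · subst hx
      rw [show bRun x c (x :: xs) = bRun x (c + 1) xs from by simp [bRun]]
      rw [ih (c + 1) (hsort.sublist (List.sublist_cons_self x xs))
          (fun y hy => hge y (List.mem_cons_of_mem x hy))]
      simp [List.dropWhile]
      ring
    · have hxi : ¬ ((x == i) = true) := by simp [hx]
      rw [show bRun i c (x :: xs) = (c, x :: xs) from by simp [bRun, hx]]
      have hgt : i < x := lt_of_le_of_ne (hge x (List.mem_cons_self)) (fun he => hx he.symm)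
      have hc : (x :: xs).count i = 0 := by
        rw [List.count_eq_zero]
        intro hmem
        rcases List.mem_cons.mp hmem with he | hmem'
        · exact hx he.symm
        · have := (List.pairwise_cons.mp hsort).1 i hmem'
          omega
      simp [hc, List.dropWhile, hxi]

-- B's outer loop: scanning indices i0, i0+1, … over a sorted suffix with elements ≥ i0
-- appends exactly the per-value counts
theorem scan_core : ∀ (n : Nat) (i0 : Int) (rest out : List Int),
    rest.Pairwise (· ≤ ·) → (∀ x ∈ rest, i0 ≤ x) →
    ((PySem.List.pyRange i0 (i0 + (n : Int)) 1).foldl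
        (fun st i => let cr := bRun i 0 st.2; (st.1 ++ [cr.1], cr.2)) (out, rest)).1
      = out ++ List.map (fun (k : Nat) => ((rest.count (i0 + (k : Int))) : Int)) (List.range n) := by
  intro n
  induction n with
  | zero =>
    intro i0 rest out _ _
    have h0 : PySem.List.pyRange i0 (i0 + ((0 : Nat) : Int)) 1 = [] := by
      rw [PySem.List.pyRange_one]; simp
    rw [h0]
    simp
  | succ m ih =>
    intro i0 rest out hsort hge
    have hlt : i0 < i0 + ((m + 1 : Nat) : Int) := by push_cast; omega
    rw [PySem.List.pyRange_one_cons hlt, List.foldl_cons]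
    simp only []
    rw [bRun_spec i0 rest 0 hsort hge]
    set rest' := rest.dropWhile (· == (i0 : Int)) with hrest'
    have hsort' : rest'.Pairwise (· ≤ ·) := hsort.sublist (List.dropWhile_sublist _)
    have hge' : ∀ x ∈ rest', i0 + 1 ≤ x := by
      intro x hx
      have hxr : x ∈ rest := (List.dropWhile_sublist _).mem hx
      have h1 : i0 ≤ x := hge x hxr
      rcases lt_or_eq_of_le h1 with h | h
      · omega
      · exfalso
        -- x = i0 cannot survive dropWhile on a sorted list with min ≥ i0
        subst h
        cases hr : rest' with
        | nil => rw [hr] at hx; simp at hx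
        | cons y ys =>
          have hyne : ¬ ((y == i0) = true) := by
            have := List.head?_dropWhile_not (· == (i0 : Int)) rest
            rw [← hrest', hr] at this
            simpa using this
          have hyx : i0 < y := by
            have hyr : y ∈ rest := (List.dropWhile_sublist _).mem (hr ▸ List.mem_cons_self)
            have h2 := hge y hyr
            have hne : y ≠ i0 := by simpa using hyne
            omega
          rw [hr] at hx
          rcases List.mem_cons.mp hx with he | hmem'
          · omega
          · have hys : List.Pairwise (· ≤ ·) (y :: ys) := hr ▸ hsort'
            have := (List.pairwise_cons.mp hys).1 i0 hmem'
            omega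
    have hcnt : ∀ k : Nat, rest'.count ((i0 + 1) + (k : Int)) = rest.count (i0 + ((k + 1 : Nat) : Int)) := by
      intro k
      have harg : (i0 + 1) + (k : Int) = i0 + ((k + 1 : Nat) : Int) := by push_cast; ring
      rw [harg]
      have htd := List.takeWhile_append_dropWhile (p := (· == (i0 : Int))) (l := rest)
      conv_rhs => rw [← htd]
      rw [List.count_append, ← hrest']
      have hz : (rest.takeWhile (· == (i0 : Int))).count (i0 + ((k + 1 : Nat) : Int)) = 0 := by
        rw [List.count_eq_zero]
        intro hmem
        have := List.mem_takeWhile_imp hmem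
        simp at this
        omega
      omega
    have harg2 : i0 + ((m + 1 : Nat) : Int) = (i0 + 1) + (m : Int) := by push_cast; ring
    rw [harg2]
    have hfold := ih (i0 + 1) rest' (out ++ [(0 + (rest.count i0 : Int))]) hsort' hge'
    rw [hfold]
    rw [List.range_succ_eq_map, List.map_cons, List.map_map]
    simp only [List.append_assoc, List.singleton_append]
    have hhead : (0 : Int) + (rest.count i0 : Int) = (rest.count (i0 + ((0 : Nat) : Int)) : Int) := by
      simp
    rw [hhead]
    congr 1
    congr 1
    apply List.map_congr_left
    intro k _
    simp only [Function.comp_apply]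
    rw [hcnt k]

-- the last element of a nonempty ≤-sorted list bounds every element
theorem pv_le_getLast (l : List Int) (hne : l ≠ []) (hsort : l.Pairwise (· ≤ ·)) :
    ∀ x ∈ l, x ≤ l.getLast hne := by
  intro x hx
  obtain ⟨p, hp, he⟩ := List.mem_iff_getElem.mp hx
  rw [List.getLast_eq_getElem, ← he]
  rcases Nat.lt_or_ge p (l.length - 1) with h | h
  · exact List.pairwise_iff_getElem.mp hsort p (l.length - 1) (by omega) (by omega) (by omega)
  · have hpe : p = l.length - 1 := by omega
    subst hpe; exact le_refl _

-- lens[-1] on a nonempty list is its last element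
theorem pv_pyGetD_neg_one (l : List Int) (h : l ≠ []) :
    PySem.List.pyGetD l (-1) 0 = l.getLast h := by
  cases l with
  | nil => simp at h
  | cons a t =>
    simp [PySem.List.pyGetD, PySem.List.pyGet?, PySem.List.pyIdx?, List.getLast_eq_getElem]
    rfl

-- ===== VERDICT (by name: the statement is the Claim_ definition above) =====
theorem num_listings_spec : Claim_equal_num_listings := by
  intro d _
  unfold Spec_num_listings num_listings num_listings_alt
  simp only []
  set vs := (pvDictOf d).items with hvs
  set lens0 : List Int := (pvDictOf d).values.map (fun v => (v.length : Int)) with hlens0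
  set lens : List Int := PySem.List.sorted lens0 (fun x => x) false with hlens
  obtain ⟨c1, c2, c3⟩ := num_listings_core vs ([0,0,0,0,0,0,0,0,0,0,0]) 10 (by simp)
  have hperm : lens.Perm lens0 := PySem.List.sorted_perm lens0 (fun x => x) false
  have hsort : lens.Pairwise (· ≤ ·) := PySem.List.sorted_pairwise lens0 (fun x => x)
  have hlens0vs : lens0 = vs.map (fun v => ((v.2.length : Int))) := by
    simp only [hlens0, PySem.Dict.values, List.map_map, Function.comp_def, hvs]
  -- A's final slots value M is the running max of the lengths, seeded with 10
  set M := vs.foldl (fun m v => if (v.2.length : Int) > m then (v.2.length : Int) else m) 10 with hM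
  have hfmax : M = lens0.foldl max 10 := by
    rw [hM, hlens0vs, List.foldl_map]
    apply PySem.List.foldl_congr_mem
    intro acc x _
    dsimp only
    split <;> omega
  have h10 : (10:Int) ≤ M := by
    rw [hfmax]; exact (PySem.List.le_foldl_max lens0 10).1
  have hMub : ∀ x ∈ lens0, x ≤ M := by
    rw [hfmax]; exact (PySem.List.le_foldl_max lens0 10).2
  -- B's top equals M
  set top : Int := if !lens.isEmpty && PySem.List.pyGetD lens (-1) 0 > 10 then PySem.List.pyGetD lens (-1) 0 else 10 with htop
  have htopM : top = M := by
    by_cases hl : lens = []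
    · have h0 : lens0 = [] := by
        have hlen := hperm.length_eq
        rw [hl] at hlen
        exact List.length_eq_zero_iff.mp (by simpa using hlen.symm)
      rw [htop, hl, hfmax, h0]; simp
    · have hlastget := pv_pyGetD_neg_one lens hl
      have hLmem : lens.getLast hl ∈ lens0 := hperm.mem_iff.mp (List.getLast_mem hl)
      have hLub : ∀ x ∈ lens0, x ≤ lens.getLast hl := by
        intro x hx
        exact pv_le_getLast lens hl hsort x (hperm.mem_iff.mpr hx)
      have hLM : lens.getLast hl ≤ M := hMub _ hLmem
      have hMm : M = 10 ∨ M ∈ lens0 := by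
        rw [hfmax]; exact PySem.List.foldl_max_mem lens0 10
      rw [htop, hlastget]
      by_cases hgt : lens.getLast hl > 10
      · rw [if_pos (by simp [List.isEmpty_eq_false_iff.mpr hl, hgt])]
        rcases hMm with h | h
        · omega
        · exact le_antisymm hLM (hLub M h)
      · rw [if_neg (by simp [List.isEmpty_eq_false_iff.mpr hl]; omega)]
        rcases hMm with h | h
        · omega
        · have := hLub M h; omega
  -- evaluate B's fold with scan_core
  have hge0 : ∀ x ∈ lens, (0:Int) ≤ x := by
    intro x hx
    have hx0 := hperm.mem_iff.mp hx
    rw [hlens0vs] at hx0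
    obtain ⟨v, _, hv⟩ := List.mem_map.mp hx0
    omega
  have hub : top + 1 = (0:Int) + (((M + 1).toNat : Nat) : Int) := by omega
  have hB : (((PySem.List.pyRange 0 (top + 1) 1).foldl
      (fun st i => let cr := bRun i 0 st.2; (st.1 ++ [cr.1], cr.2))
      (([] : List Int), lens)).1)
      = List.map (fun (k : Nat) => ((lens.count ((0:Int) + (k : Int))) : Int)) (List.range (M + 1).toNat) := by
    rw [hub, scan_core (M + 1).toNat 0 lens [] hsort hge0]
    simp
  rw [hB]
  -- compare elementwise with A's result
  have hAlen : ((vs.foldl numListingsStep ([0,0,0,0,0,0,0,0,0,0,0], 10)).1.length : Int) = M + 1 := by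
    rw [c1, c2]
  apply List.ext_getElem
  · simp only [List.length_map, List.length_range]
    omega
  · intro i h1 h2
    rw [← List.getD_eq_getElem _ 0 h1, c3 i]
    rw [List.getElem_map, List.getElem_range]
    have hcount : lens.count ((0:Int) + (i : Int)) = lens0.count (i : Int) := by
      rw [zero_add]; exact hperm.count_eq _
    rw [hcount, hlens0vs]
    have hinit : ([0,0,0,0,0,0,0,0,0,0,0] : List Int).getD i 0 = 0 := by
      rcases Nat.lt_or_ge i 11 with hi | hi
      · interval_cases i <;> rfl
      · rw [List.getD_eq_getElem?_getD, List.getElem?_eq_none (by simpa using hi)]; rfl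
    rw [hinit]
    simp
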